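-- pv_equiv track=rewrite | github.com/synthesis-labs/AoC_2024 | pfunzo/Day 1/parttwo.py | Solution
-- ===== SOURCE A (Python) =====
-- def Solution(left, right):
--     sum = 0
--     for i in range(len(left)):
--         count = 0
--         for num in right:
--             if num == left[i]:
--                 count+=1
--
--         sum+=(left[i] * count)
--
--     return sum
-- ===== SOURCE B (Python) =====
-- def Solution(left, right):
--     cntL = {}
--     for x in left:
--         cntL[x] = cntL.get(x, 0) + 1
--     cntR = {}
--     for x in right:
--         cntR[x] = cntR.get(x, 0) + 1
--     total = 0
--     for v, c in cntL.items():
--         total += v * c * cntR.get(v, 0)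
--     return total
-- ===== Notes on version B (the rewrite author's own statement) =====
-- stated objective: faster
-- what changed: Replaces A's nested per-element scan of right with two frequency tables built in one pass each, then a single loop over the distinct values of left accumulating v * cntL[v] * cntR.get(v, 0).
import Mathlib
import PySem

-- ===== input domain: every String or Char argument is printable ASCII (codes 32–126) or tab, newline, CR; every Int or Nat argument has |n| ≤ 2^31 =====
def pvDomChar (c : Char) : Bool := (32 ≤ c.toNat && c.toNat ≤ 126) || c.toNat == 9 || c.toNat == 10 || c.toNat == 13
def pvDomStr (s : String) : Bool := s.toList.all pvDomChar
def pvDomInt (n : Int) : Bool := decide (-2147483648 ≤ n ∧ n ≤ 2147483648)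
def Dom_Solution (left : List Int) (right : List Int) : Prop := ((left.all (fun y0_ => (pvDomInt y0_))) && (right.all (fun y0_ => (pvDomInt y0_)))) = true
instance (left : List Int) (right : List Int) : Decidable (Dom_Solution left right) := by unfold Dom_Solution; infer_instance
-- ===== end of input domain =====

-- B: two frequency tables built once (one pass each), then one loop over the distinct
-- values of left — replaces A's inner scan of right for every element of left.
-- ===== PORT A =====
def Solution (left : List Int) (right : List Int) : Int :=
  (PySem.List.pyRange 0 left.length 1).foldl
    (fun sum i =>
      let count : Int :=
        right.foldl (fun count num =>
          if num == PySem.List.pyGetD left i 0 then count + 1 else count) 0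
      sum + PySem.List.pyGetD left i 0 * count)  -- index i is always in range
    0

-- ===== PORT B =====
def Solution_alt (left : List Int) (right : List Int) : Int :=
  let cntL := left.foldl (fun d x => d.insert x (d.getD x 0 + 1)) PySem.Dict.empty
  let cntR := right.foldl (fun d x => d.insert x (d.getD x 0 + 1)) PySem.Dict.empty
  cntL.items.foldl (fun total p => total + p.1 * p.2 * cntR.getD p.1 0) 0

-- ===== PRECONDITION & SPEC =====
def Spec_Solution (left : List Int) (right : List Int) (out : Int) : Prop := out = Solution_alt left right
instance (left : List Int) (right : List Int) (out : Int) : Decidable (Spec_Solution left right out) := by unfold Spec_Solution; infer_instance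

-- ===== CLAIM (what is proved, stated in full; the proofs are below) =====
def Claim_equal_Solution : Prop := ∀ (left : List Int) (right : List Int), Dom_Solution left right → Spec_Solution left right (Solution left right)

-- ===== LEMMAS AND PROOFS =====

-- grouping identity: summing f over l equals summing count·f over l's distinct values
theorem sum_map_eq_sum_dedup (l : List Int) (f : Int → Int) :
    (l.map f).sum
      = ((PySem.Set.ofList l).map (fun v => (l.count v : Int) * f v)).sum := by
  have hnd : (PySem.Set.ofList l : List Int).Nodup := PySem.Set.nodup_ofList l
  have hfin : (PySem.Set.ofList l : List Int).toFinset = l.toFinset := by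
    apply Finset.ext
    intro a
    simp [List.mem_toFinset, PySem.Set.mem_ofList]
  rw [Finset.sum_list_map_count]
  rw [← List.sum_toFinset _ hnd, hfin]
  apply Finset.sum_congr rfl
  intro m _
  ring

theorem Solution_eq (left right : List Int) :
    Solution left right = Solution_alt left right := by
  unfold Solution Solution_alt
  simp only [PySem.List.foldl_beq_add_one, zero_add,
      PySem.Dict.foldl_insert_getD_add_one_eq_counter, PySem.Dict.items_counter,
      PySem.Dict.getD_counter]
  rw [PySem.List.foldl_pyRange_zero_pyGetD' left 0
        (fun s x => s + x * (right.count x : Int)) 0]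
  rw [PySem.List.foldl_add, PySem.List.foldl_add, List.map_map]
  simp only [zero_add, Function.comp_def]
  rw [sum_map_eq_sum_dedup left (fun x => x * (right.count x : Int))]
  apply congrArg
  apply List.map_congr_left
  intro v _
  ring

-- ===== VERDICT (by name: the statement is the Claim_ definition above) =====
theorem Solution_spec : Claim_equal_Solution := by
  intro left right _
  unfold Spec_Solution
  exact Solution_eq left right
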